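-- pv_equiv track=rewrite | github.com/Coriana/TinyStories_Char | app.py | add_caseifer
-- ===== SOURCE A (Python) =====
-- def add_caseifer(text):
--     tokenlist = set("\n\" !$&'#,/+=-<>*@.:;[]{}()^_?0123456789ABCDEFGHIJKLMNOPQRSTUVWXYZabcdefghijklmnopqrstuvwxyzèé")
--     replace_map = {
--         "{": "[",
--         "(": "[",
--         "}": "]",
--         ")": "]",
--         "&":"and"
--     }
--     upperlist = set("ABCDEFGHIJKLMNOPQRSTUVWXYZ")
--     new_text = ""
--     for char in text:
--         if char in tokenlist:
--             if char in upperlist: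
--                 new_text += "↨" + char.lower()
--             elif char in replace_map:
--                 new_text += replace_map[char]
--             else:
--                 new_text += char
--     return new_text
-- ===== SOURCE B (Python) =====
-- _TOKENS = set("\n\" !$&'#,/+=-<>*@.:;[]{}()^_?0123456789ABCDEFGHIJKLMNOPQRSTUVWXYZabcdefghijklmnopqrstuvwxyzèé")
--
-- def add_caseifer(text):
--     # pass 1: drop characters outside the token set
--     kept = "".join(c for c in text if c in _TOKENS)
--     # pass 2: whole-string bracket/ampersand substitutions
--     kept = (kept.replace("{", "[").replace("(", "[")
--                 .replace("}", "]").replace(")", "]")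
--                 .replace("&", "and"))
--     # pass 3: encode uppercase letters as '↨' + lowercase
--     return "".join("↨" + c.lower() if c.isupper() else c for c in kept)
-- ===== Notes on version B (the rewrite author's own statement) =====
-- stated objective: alternative
-- what changed: Replaced A's single fold with per-character nested if/elif dispatch by three staged whole-string passes: filter to the token set, then chained str.replace substitutions over the whole string, then a final pass encoding uppercase letters via isupper/lower.
import Mathlib
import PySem

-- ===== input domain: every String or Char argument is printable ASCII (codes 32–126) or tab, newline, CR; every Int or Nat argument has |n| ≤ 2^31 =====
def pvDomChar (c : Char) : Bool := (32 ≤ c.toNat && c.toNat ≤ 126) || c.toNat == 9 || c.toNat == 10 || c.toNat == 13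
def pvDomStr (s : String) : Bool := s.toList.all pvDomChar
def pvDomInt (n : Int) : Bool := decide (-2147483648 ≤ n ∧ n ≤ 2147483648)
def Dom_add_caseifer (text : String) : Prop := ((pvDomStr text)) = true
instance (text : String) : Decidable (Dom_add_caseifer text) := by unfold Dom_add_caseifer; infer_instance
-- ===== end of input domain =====

-- B replaces A's single per-character branch-dispatch fold by three staged whole-string
-- passes (filter to the token set, chained replace substitutions, then uppercase encoding);
-- objective: alternative (same cost, different staging).

-- ===== PORT A =====
def pvTokenlist : PySem.Set Char :=
  PySem.Set.ofList "\n\" !$&'#,/+=-<>*@.:;[]{}()^_?0123456789ABCDEFGHIJKLMNOPQRSTUVWXYZabcdefghijklmnopqrstuvwxyzèé".toList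

def pvReplaceMap : PySem.Dict Char (List Char) :=
  ((((PySem.Dict.empty.insert '{' "[".toList).insert '(' "[".toList).insert
      '}' "]".toList).insert ')' "]".toList).insert '&' "and".toList

def pvUpperlist : PySem.Set Char :=
  PySem.Set.ofList "ABCDEFGHIJKLMNOPQRSTUVWXYZ".toList

def add_caseifer (text : String) : String :=
  String.mk (text.toList.foldl (fun new_text char =>
    if pvTokenlist.contains char then
      if pvUpperlist.contains char then
        new_text ++ '↨' :: [PySem.Chars.lowerChar char]
      else if pvReplaceMap.contains char then
        new_text ++ pvReplaceMap.getD char []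
      else
        new_text ++ [char]
    else new_text) [])

-- ===== PORT B =====
def pvTokensB : PySem.Set Char :=
  PySem.Set.ofList "\n\" !$&'#,/+=-<>*@.:;[]{}()^_?0123456789ABCDEFGHIJKLMNOPQRSTUVWXYZabcdefghijklmnopqrstuvwxyzèé".toList

def add_caseifer_alt (text : String) : String :=
  -- pass 1: drop characters outside the token set
  let kept := text.toList.filter (fun c => pvTokensB.contains c)
  -- pass 2: whole-string bracket/ampersand substitutions (str.replace = PySem.Chars.replace)
  let kept := PySem.Chars.replace (PySem.Chars.replace (PySem.Chars.replace
      (PySem.Chars.replace (PySem.Chars.replace kept "{".toList "[".toList)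
        "(".toList "[".toList) "}".toList "]".toList) ")".toList "]".toList)
      "&".toList "and".toList
  -- pass 3: encode uppercase letters as '↨' + lowercase
  String.mk (kept.flatMap (fun c =>
    if PySem.Chars.isupper c then '↨' :: [PySem.Chars.lowerChar c] else [c]))

-- ===== PRECONDITION & SPEC =====
def Spec_add_caseifer (text : String) (out : String) : Prop := out = add_caseifer_alt text
instance (text : String) (out : String) : Decidable (Spec_add_caseifer text out) := by unfold Spec_add_caseifer; infer_instance

-- ===== CLAIM =====
def Claim_equal_add_caseifer : Prop := ∀ (text : String), Dom_add_caseifer text → Spec_add_caseifer text (add_caseifer text)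

-- ===== LEMMAS AND PROOFS =====

/-- The chunk A appends for one character. -/
def pieceA (c : Char) : List Char :=
  if pvTokenlist.contains c then
    if pvUpperlist.contains c then '↨' :: [PySem.Chars.lowerChar c]
    else if pvReplaceMap.contains c then pvReplaceMap.getD c []
    else [c]
  else []

/-- Per-character function of a single-char replace. -/
def repChar (a : Char) (new : List Char) (c : Char) : List Char :=
  if c = a then new else [c]

/-- The case-encoding chunk of B's last pass. -/
def caseChunk (c : Char) : List Char :=
  if PySem.Chars.isupper c then '↨' :: [PySem.Chars.lowerChar c] else [c]

/-- What B contributes, composed per character. -/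
def pieceB (c : Char) : List Char :=
  if pvTokensB.contains c then
    (((((repChar '{' "[".toList c).flatMap (repChar '(' "[".toList)).flatMap
        (repChar '}' "]".toList)).flatMap (repChar ')' "]".toList)).flatMap
        (repChar '&' "and".toList)).flatMap caseChunk
  else []

theorem replace_go_single (a : Char) (new : List Char) :
    ∀ (l : List Char) (fuel : Nat) (acc : List Char), l.length ≤ fuel →
      PySem.Chars.replace.go [a] new fuel l acc
        = acc.reverse ++ l.flatMap (repChar a new) := by
  intro l
  induction l with
  | nil =>
    intro fuel acc _
    cases fuel <;> simp [PySem.Chars.replace.go]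
  | cons c t ih =>
    intro fuel acc h
    cases fuel with
    | zero => simp at h
    | succ f =>
      rw [PySem.Chars.replace.go]
      have hlen : t.length ≤ f := by simpa using h
      by_cases hc : c = a
      · subst hc
        have hpre : [c].isPrefixOf (c :: t) = true := by simp [List.isPrefixOf]
        rw [if_pos hpre]
        simp [ih f _ hlen, repChar]
      · have hpre : [a].isPrefixOf (c :: t) = false := by
          simp [List.isPrefixOf]
          exact fun h' => hc h'.symm
        rw [if_neg (by simp [hpre])]
        simp [ih f _ hlen, repChar, hc]

theorem replace_single (s : List Char) (a : Char) (new : List Char) :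
    PySem.Chars.replace s [a] new = s.flatMap (repChar a new) := by
  rw [PySem.Chars.replace]
  simp [replace_go_single a new s s.length [] le_rfl]

theorem filter_eq_flatMap (l : List Char) (p : Char → Bool) :
    l.filter p = l.flatMap (fun c => if p c then [c] else []) := by
  induction l with
  | nil => rfl
  | cons c t ih => by_cases h : p c <;> simp [h, ih]

set_option maxRecDepth 8192 in
theorem alt_eq_flatMap (text : String) :
    add_caseifer_alt text = String.mk (text.toList.flatMap pieceB) := by
  have h1 : "{".toList = ['{'] := rfl
  have h2 : "(".toList = ['('] := rfl
  have h3 : "}".toList = ['}'] := rfl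
  have h4 : ")".toList = [')'] := rfl
  have h5 : "&".toList = ['&'] := rfl
  simp only [add_caseifer_alt, h1, h2, h3, h4, h5, filter_eq_flatMap, replace_single,
    List.flatMap_assoc]
  congr 1
  apply List.flatMap_congr
  intro c _
  by_cases h : c ∈ pvTokensB
  · simp [h, pieceB, List.flatMap_assoc]
    rfl
  · simp [h, pieceB]

set_option maxRecDepth 8192 in
theorem piece_eq_all :
    ((List.range 128).all fun n => pieceA (Char.ofNat n) == pieceB (Char.ofNat n)) = true := by
  decide

theorem piece_eq {c : Char} (h : pvDomChar c = true) : pieceA c = pieceB c := by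
  have hlt : c.toNat < 128 := by
    simp [pvDomChar] at h
    omega
  have := List.all_eq_true.mp piece_eq_all c.toNat (List.mem_range.mpr hlt)
  rwa [Char.ofNat_toNat, beq_iff_eq] at this

theorem foldl_eq (l : List Char) (s : List Char) (h : ∀ c ∈ l, pvDomChar c = true) :
    l.foldl (fun new_text char =>
      if pvTokenlist.contains char then
        if pvUpperlist.contains char then
          new_text ++ '↨' :: [PySem.Chars.lowerChar char]
        else if pvReplaceMap.contains char then
          new_text ++ pvReplaceMap.getD char []
        else
          new_text ++ [char]
      else new_text) s
    = s ++ l.flatMap pieceB := by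
  induction l generalizing s with
  | nil => simp
  | cons c l ih =>
    have hc : pvDomChar c = true := h c (List.mem_cons_self ..)
    have hstep : ∀ s' : List Char,
        (if pvTokenlist.contains c then
          if pvUpperlist.contains c then s' ++ '↨' :: [PySem.Chars.lowerChar c]
          else if pvReplaceMap.contains c then s' ++ pvReplaceMap.getD c []
          else s' ++ [c]
        else s') = s' ++ pieceA c := by
      intro s'; unfold pieceA; split_ifs <;> simp
    rw [List.foldl_cons, hstep, ih _ (fun x hx => h x (List.mem_cons_of_mem _ hx)),
        piece_eq hc]
    simp

-- ===== VERDICT =====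
theorem add_caseifer_spec : Claim_equal_add_caseifer := by
  intro text hdom
  unfold Spec_add_caseifer add_caseifer
  rw [alt_eq_flatMap,
      foldl_eq _ _ (by simpa [Dom_add_caseifer, pvDomStr, List.all_eq_true] using hdom)]
  simp
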